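-- pv_equiv track=rewrite | github.com/prokopk1n/named_entity_recognition | src/prepare_data.py | print_text_with_labels
-- ===== SOURCE A (Python) =====
-- def print_text_with_labels(text, labels_set):
-- 	dict = {}
-- 	for label in labels_set:
-- 		dict[label[0]] = (label[1], label[2])
--
-- 	str_res = ""
-- 	i = 0
-- 	while i < len(text):
-- 		if i in dict:
-- 			str_res += f"({text[i:dict[i][0]]})" + f"|{dict[i][1]}"
-- 			i = dict[i][0]
-- 		else:
-- 			str_res += text[i]
-- 			i+=1
--
-- 	return str_res
-- ===== SOURCE B (Python) =====
-- def print_text_with_labels(text, labels_set):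
-- 	# keep the last label for each start (dict overwrite), by scanning in reverse
-- 	spans = []
-- 	seen = set()
-- 	for label in reversed(labels_set):
-- 		if label[0] not in seen:
-- 			seen.add(label[0])
-- 			spans.append(label)
-- 	spans.sort(key=lambda l: l[0])
--
-- 	# greedy selection of the spans the scan would emit
-- 	chosen = []
-- 	pos = 0
-- 	for s, e, lab in spans:
-- 		if pos <= s < len(text):
-- 			chosen.append((s, e, lab))
-- 			pos = e
--
-- 	# render: gaps and annotated spans as whole slices
-- 	parts = []
-- 	cur = 0
-- 	for s, e, lab in chosen:
-- 		parts.append(text[cur:s] + "(" + text[s:e] + ")|" + lab)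
-- 		cur = e
-- 	parts.append(text[cur:])
-- 	return "".join(parts)
-- ===== Notes on version B (the rewrite author's own statement) =====
-- stated objective: alternative
-- what changed: Replaces A's character-by-character while-loop with a dict probe at every index by three staged passes: a reverse scan with a seen-set that keeps the last label per start (no dict), a sort of these spans by start, a greedy cursor selection of the spans the scan would emit, and a final render that joins whole-slice parts.
-- outside the precondition, e.g. on print_text_with_labels('ab', [(0, 2, 'X'), (1, 0, 'Y')]): A returns '(ab)|X', B returns '(ab)|X'; on print_text_with_labels('ab', [(1, 0, 'Y')]): A does not finish within the time limit, B returns 'a()|Yab'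
import Mathlib
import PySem

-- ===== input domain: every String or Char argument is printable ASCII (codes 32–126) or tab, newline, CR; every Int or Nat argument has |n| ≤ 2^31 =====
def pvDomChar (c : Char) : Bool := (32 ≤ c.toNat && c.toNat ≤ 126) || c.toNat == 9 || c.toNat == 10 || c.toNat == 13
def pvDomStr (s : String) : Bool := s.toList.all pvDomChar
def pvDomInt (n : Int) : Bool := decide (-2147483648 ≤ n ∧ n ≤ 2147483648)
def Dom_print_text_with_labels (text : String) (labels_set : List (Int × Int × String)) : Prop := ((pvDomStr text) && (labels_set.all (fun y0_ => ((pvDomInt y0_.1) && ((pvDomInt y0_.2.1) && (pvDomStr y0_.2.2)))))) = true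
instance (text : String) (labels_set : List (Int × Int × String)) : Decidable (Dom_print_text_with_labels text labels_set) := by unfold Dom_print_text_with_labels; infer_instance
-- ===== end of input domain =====

-- B replaces A's character-by-character scan (a dict probe per index) by staged passes:
-- reverse dedup of the label starts, sort by start, greedy span selection, then render
-- gaps and annotated spans as whole slices (objective: an alternative decomposition).

-- ===== PORT A =====
-- A's while-loop over the character index i; fuel = len(text)+1 steps suffice under
-- Pre_ (every step strictly increases i); str_res is carried as a List Char.
def pyALoop (t : List Char) (d : PySem.Dict Int (Int × String)) :
    Nat → Int → List Char → List Char
  | 0, _, acc => acc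
  | fuel + 1, i, acc =>
    if i < (t.length : Int) then
      match d.get? i with
      | some v =>
          -- str_res += f"({text[i:dict[i][0]]})" + f"|{dict[i][1]}"; i = dict[i][0]
          pyALoop t d fuel v.1
            (acc ++ '(' :: (PySem.List.slice t (some i) (some v.1) ++ ')' :: '|' :: v.2.toList))
      | none =>
          match PySem.List.pyGet? t i with
          | some c => pyALoop t d fuel (i + 1) (acc ++ [c])   -- str_res += text[i]; i += 1
          | none => acc   -- totality guard: text[i] would raise IndexError (unreachable for 0 ≤ i < len)
    else acc

def print_text_with_labels (text : String) (labels_set : List (Int × Int × String)) : String :=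
  let d := labels_set.foldl (fun d l => d.insert l.1 l.2)
            (PySem.Dict.empty : PySem.Dict Int (Int × String))
  String.ofList (pyALoop text.toList d (text.toList.length + 1) 0 [])

-- ===== PORT B =====
-- pass 1: scan reversed(labels_set) with a seen-set, keeping the last label per start
def dedupGo : List (Int × Int × String) → PySem.Set Int → List (Int × Int × String)
  | [], _ => []
  | l :: t, seen =>
    if PySem.Set.contains seen l.1 then dedupGo t seen
    else l :: dedupGo t (PySem.Set.add seen l.1)

-- pass 2 (after the sort): greedy selection with the cursor pos, collecting chosen
def selectGo (tlen : Int) : List (Int × Int × String) → Int → List (Int × Int × String)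
  | [], _ => []
  | l :: r, pos =>
    if pos ≤ l.1 ∧ l.1 < tlen then l :: selectGo tlen r l.2.1
    else selectGo tlen r pos

-- pass 3: build the parts list ("text[cur:s] + "(" + text[s:e] + ")|" + lab") with cursor cur
def renderGo (t : List Char) : List (Int × Int × String) → List (List Char) → Int →
    List (List Char) × Int
  | [], parts, cur => (parts, cur)
  | l :: r, parts, cur =>
    renderGo t r
      (parts ++ [PySem.List.slice t (some cur) (some l.1) ++
        ('(' :: (PySem.List.slice t (some l.1) (some l.2.1) ++ ')' :: '|' :: l.2.2.toList))])
      l.2.1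

def print_text_with_labels_alt (text : String) (labels_set : List (Int × Int × String)) : String :=
  let t := text.toList
  let spans := dedupGo labels_set.reverse PySem.Set.empty
  let sortedSpans := PySem.List.sorted spans (fun l => l.1) false
  let chosen := selectGo (t.length : Int) sortedSpans 0
  let pr := renderGo t chosen [] 0
  -- parts.append(text[cur:]); return "".join(parts)
  String.ofList ((pr.1 ++ [PySem.List.slice t (some pr.2) none]).flatten)

-- ===== PRECONDITION & SPEC =====
-- Pre_ excludes label spans of non-positive length whose start lies inside the text
-- ((s,e,l) with 0 ≤ s < len(text) and e ≤ s): when A's scan reaches such a start it jumps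
-- backwards or stays put and loops forever (or re-emits text), and when it does not reach
-- it (the start is covered by an earlier span) A's returned value is an accident of which
-- starts its scan happens to visit; B skips such starts deliberately.
def Pre_print_text_with_labels (text : String) (labels_set : List (Int × Int × String)) : Prop :=
  ∀ l ∈ labels_set, 0 ≤ l.1 → l.1 < (text.toList.length : Int) → l.1 < l.2.1
instance (text : String) (labels_set : List (Int × Int × String)) : Decidable (Pre_print_text_with_labels text labels_set) := by unfold Pre_print_text_with_labels; infer_instance

def pvWitness_print_text_with_labels : String × (List (Int × Int × String)) :=
  ("hello world", [(0, 5, "GREET"), (6, 11, "PLACE")])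

def Spec_print_text_with_labels (text : String) (labels_set : List (Int × Int × String)) (out : String) : Prop := out = print_text_with_labels_alt text labels_set
instance (text : String) (labels_set : List (Int × Int × String)) (out : String) : Decidable (Spec_print_text_with_labels text labels_set out) := by unfold Spec_print_text_with_labels; infer_instance

-- ===== CLAIM (what is proved, stated in full; the proofs are below) =====
def Claim_equal_print_text_with_labels : Prop := ∀ (text : String) (labels_set : List (Int × Int × String)), Dom_print_text_with_labels text labels_set → Pre_print_text_with_labels text labels_set → Spec_print_text_with_labels text labels_set (print_text_with_labels text labels_set)

-- ===== LEMMAS AND PROOFS =====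

-- the value attached to the FIRST occurrence of key k in xs (proof-side spec)
def firstGet : List (Int × Int × String) → Int → Option (Int × String)
  | [], _ => none
  | l :: t, k => if l.1 = k then some l.2 else firstGet t k

-- what B's render pass emits from a chosen list, cursor at cur (proof-side spec)
def Rspec (t : List Char) : List (Int × Int × String) → Int → List Char
  | [], cur => PySem.List.slice t (some cur) none
  | l :: r, cur =>
    (PySem.List.slice t (some cur) (some l.1) ++
      ('(' :: (PySem.List.slice t (some l.1) (some l.2.1) ++ ')' :: '|' :: l.2.2.toList))) ++
    Rspec t r l.2.1

theorem firstGet_append (xs ys : List (Int × Int × String)) (k : Int) :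
    firstGet (xs ++ ys) k = (firstGet xs k).or (firstGet ys k) := by
  induction xs with
  | nil => simp [firstGet]
  | cons a t ih =>
    by_cases h : a.1 = k
    · simp [firstGet, h]
    · simp [firstGet, h, ih]

theorem firstGet_mem (xs : List (Int × Int × String)) (k : Int) (v : Int × String)
    (h : firstGet xs k = some v) : (k, v.1, v.2) ∈ xs := by
  induction xs with
  | nil => exact absurd h (by simp [firstGet])
  | cons a t ih =>
    by_cases ha : a.1 = k
    · rw [firstGet, if_pos ha] at h
      injection h with h
      subst h; subst ha
      exact List.mem_cons.2 (Or.inl rfl)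
    · rw [firstGet, if_neg ha] at h
      exact List.mem_cons_of_mem _ (ih h)

-- the dict A's fold builds looks up the LAST occurrence = first occurrence in reverse
theorem get?_foldl_firstGet (ls : List (Int × Int × String)) :
    ∀ (d : PySem.Dict Int (Int × String)) (k : Int),
      (ls.foldl (fun d l => d.insert l.1 l.2) d).get? k =
        (firstGet ls.reverse k).or (d.get? k) := by
  induction ls with
  | nil => intro d k; simp [firstGet]
  | cons a t ih =>
    intro d k
    rw [List.foldl_cons, ih, List.reverse_cons, firstGet_append, Option.or_assoc]
    congr 1
    by_cases h : a.1 = k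
    · subst h; simp [firstGet, PySem.Dict.get?_insert_self]
    · rw [PySem.Dict.get?_insert_of_ne _ _ (fun hk => h hk.symm)]
      simp [firstGet, h]

-- B's reverse dedup keeps exactly the first occurrence of each unseen start
theorem mem_dedupGo (xs : List (Int × Int × String)) :
    ∀ (seen : PySem.Set Int) (l : Int × Int × String),
      l ∈ dedupGo xs seen ↔ (l.1 ∉ seen ∧ firstGet xs l.1 = some l.2) := by
  induction xs with
  | nil => intro seen l; simp [dedupGo, firstGet]
  | cons a t ih =>
    intro seen l
    by_cases hc : PySem.Set.contains seen a.1
    · have ha : a.1 ∈ seen := List.contains_iff_mem.1 hc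
      rw [dedupGo, if_pos hc, ih]
      by_cases h : a.1 = l.1
      · have hin : l.1 ∈ seen := h ▸ ha
        constructor
        · rintro ⟨hns, -⟩; exact absurd hin hns
        · rintro ⟨hns, -⟩; exact absurd hin hns
      · simp [firstGet, fun hh => h hh]
    · have ha : a.1 ∉ seen := fun h => hc (List.contains_iff_mem.2 h)
      rw [dedupGo, if_neg hc]
      rw [List.mem_cons, ih]
      by_cases h : a.1 = l.1
      · constructor
        · rintro (rfl | ⟨hns, -⟩)
          · exact ⟨h ▸ ha, by rw [firstGet, if_pos h]⟩
          · exact absurd ((PySem.Set.mem_add seen a.1 l.1).2 (Or.inr h.symm)) hns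
        · rintro ⟨-, hg⟩
          rw [firstGet, if_pos h] at hg
          injection hg with hg
          left
          obtain ⟨a1, a2⟩ := a
          obtain ⟨l1, l2⟩ := l
          simp only at h hg
          rw [h, hg]
      · constructor
        · rintro (rfl | ⟨hns, hg⟩)
          · exact absurd rfl h
          · refine ⟨fun hm => hns ((PySem.Set.mem_add seen a.1 l.1).2 (Or.inl hm)), ?_⟩
            rw [firstGet, if_neg h]; exact hg
        · rintro ⟨hns, hg⟩
          rw [firstGet, if_neg h] at hg
          right
          refine ⟨fun hm => ?_, hg⟩
          rcases (PySem.Set.mem_add seen a.1 l.1).1 hm with hm | hm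
          · exact hns hm
          · exact h hm.symm

-- the kept spans have pairwise distinct starts
theorem dedupGo_pairwise (xs : List (Int × Int × String)) :
    ∀ (seen : PySem.Set Int), (dedupGo xs seen).Pairwise (fun a b => a.1 ≠ b.1) := by
  induction xs with
  | nil => intro seen; simp [dedupGo]
  | cons a t ih =>
    intro seen
    by_cases hc : PySem.Set.contains seen a.1
    · rw [dedupGo, if_pos hc]; exact ih seen
    · rw [dedupGo, if_neg hc]
      refine List.pairwise_cons.2 ⟨fun l hl => ?_, ih _⟩
      have := ((mem_dedupGo t _ l).1 hl).1
      intro h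
      exact this ((PySem.Set.mem_add seen a.1 l.1).2 (Or.inr h.symm))

-- once the cursor is at or past the end, nothing is selected and the tail slice is empty
theorem Rspec_done (t : List Char) (sp : List (Int × Int × String)) (pos : Int)
    (h0 : 0 ≤ pos) (hlen : (t.length : Int) ≤ pos) :
    Rspec t (selectGo (t.length : Int) sp pos) pos = [] := by
  induction sp with
  | nil =>
    simp only [selectGo, Rspec, PySem.List.slice_from t h0]
    exact List.drop_eq_nil_of_le (by omega)
  | cons a r ih =>
    rw [selectGo, if_neg (by omega)]
    exact ih

private theorem drop_cons_of_lt (t : List Char) (pos : Int) (h0 : 0 ≤ pos)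
    (hlt : pos < (t.length : Int)) :
    t.drop pos.toNat = t[pos.toNat]! :: t.drop (pos + 1).toNat := by
  have hp : pos.toNat < t.length := by omega
  have h1 : (pos + 1).toNat = pos.toNat + 1 := by omega
  rw [h1, List.drop_eq_getElem_cons hp, getElem!_pos t pos.toNat hp]

-- advancing the cursor over one character that starts no span peels it off the rendering
theorem Rspec_shift (t : List Char) (sp : List (Int × Int × String)) (pos : Int)
    (h0 : 0 ≤ pos) (hlt : pos < (t.length : Int)) (hns : pos ∉ sp.map (fun l => l.1)) :
    Rspec t (selectGo (t.length : Int) sp pos) pos =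
      t[pos.toNat]! :: Rspec t (selectGo (t.length : Int) sp (pos + 1)) (pos + 1) := by
  induction sp with
  | nil =>
    simp only [selectGo, Rspec, PySem.List.slice_from t h0,
      PySem.List.slice_from t (by omega : (0:Int) ≤ pos + 1)]
    exact drop_cons_of_lt t pos h0 hlt
  | cons a r ih =>
    have hne : a.1 ≠ pos := by
      intro h; exact hns (List.mem_map.2 ⟨a, List.mem_cons_self, h⟩)
    have hns' : pos ∉ r.map (fun l => l.1) := fun h =>
      hns (List.mem_map.1 h |>.elim fun l hl => List.mem_map.2 ⟨l, List.mem_cons_of_mem _ hl.1, hl.2⟩)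
    by_cases htake : pos ≤ a.1 ∧ a.1 < (t.length : Int)
    · have htake' : pos + 1 ≤ a.1 ∧ a.1 < (t.length : Int) := ⟨by omega, htake.2⟩
      rw [selectGo, if_pos htake, selectGo, if_pos htake']
      simp only [Rspec]
      rw [PySem.List.slice_toNat t h0 (by omega : (0:Int) ≤ a.1),
        PySem.List.slice_toNat t (by omega : (0:Int) ≤ pos + 1) (by omega : (0:Int) ≤ a.1)]
      rw [drop_cons_of_lt t pos h0 hlt]
      have : a.1.toNat - pos.toNat = (a.1.toNat - (pos + 1).toNat) + 1 := by omega
      rw [this, List.take_succ_cons]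
      simp
    · have htake' : ¬ (pos + 1 ≤ a.1 ∧ a.1 < (t.length : Int)) := by omega
      rw [selectGo, if_neg htake, selectGo, if_neg htake']
      exact ih hns'

-- MAIN: A's fuelled character scan renders exactly the greedily selected spans
theorem main_loop (t : List Char) (d : PySem.Dict Int (Int × String))
    (hPre : ∀ (k : Int) (v : Int × String), d.get? k = some v → 0 ≤ k → k < (t.length : Int) → k < v.1) :
    ∀ (fuel : Nat) (sp : List (Int × Int × String)) (pos : Int) (acc : List Char),
      (∀ (s : Int) (v : Int × String), pos ≤ s → (d.get? s = some v ↔ (s, v.1, v.2) ∈ sp)) →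
      sp.Pairwise (fun a b => a.1 < b.1) →
      0 ≤ pos →
      (t.length : Int) - pos ≤ (fuel : Int) →
      pyALoop t d fuel pos acc = acc ++ Rspec t (selectGo (t.length : Int) sp pos) pos := by
  intro fuel
  induction fuel with
  | zero =>
    intro sp pos acc _ _ h0 hfuel
    simp only [pyALoop]
    rw [Rspec_done t sp pos h0 (by omega), List.append_nil]
  | succ fuel ih =>
    intro sp pos acc hinv hpw h0 hfuel
    by_cases hlt : pos < (t.length : Int)
    · cases hget : d.get? pos with
      | some v =>
        have hmem : (pos, v.1, v.2) ∈ sp := (hinv pos v le_rfl).1 hget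
        have hpe : pos < v.1 := hPre pos v hget h0 hlt
        simp only [pyALoop, if_pos hlt, hget]
        -- peel sp down to the span starting at pos
        induction sp with
        | nil => exact absurd hmem List.not_mem_nil
        | cons a tl ihk =>
          rcases List.pairwise_cons.1 hpw with ⟨hall, hpw'⟩
          by_cases hapos : a.1 = pos
          · -- the head is the span A consumes; its value must be v
            have hav : d.get? a.1 = some a.2 :=
              (hinv a.1 a.2 (by omega) |>.2) (by obtain ⟨a1, a2⟩ := a; exact List.mem_cons_self)
            rw [hapos, hget] at hav
            injection hav with hav
            rw [selectGo, if_pos ⟨by omega, by omega⟩]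
            simp only [Rspec]
            have hslice : PySem.List.slice t (some pos) (some a.1) = ([] : List Char) := by
              rw [hapos, PySem.List.slice_toNat t h0 h0]; simp
            rw [hslice, List.nil_append, hapos, ← hav]
            rw [ih tl v.1
              (acc ++ '(' :: (PySem.List.slice t (some pos) (some v.1) ++ ')' :: '|' :: v.2.toList))
              (by
                intro s v' hs
                rw [hinv s v' (by omega), List.mem_cons]
                constructor
                · rintro (hh | hh)
                  · exfalso
                    obtain ⟨a1, a2⟩ := a
                    injection hh with h1 h2
                    omega
                  · exact hh
                · exact Or.inr)
              hpw' (by omega) (by omega)]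
            rw [List.append_assoc]
          · -- the head starts strictly before pos: skipped by the selection
            have hmem' : (pos, v.1, v.2) ∈ tl := by
              rcases List.mem_cons.1 hmem with h | h
              · exact absurd (congrArg Prod.fst h).symm hapos
              · exact h
            have hklt : a.1 < pos := hall _ hmem'
            rw [selectGo, if_neg (by omega)]
            exact ihk (by
                intro s v' hs
                rw [hinv s v' hs, List.mem_cons]
                constructor
                · rintro (hh | hh)
                  · exfalso
                    obtain ⟨a1, a2⟩ := a
                    injection hh with h1 h2
                    omega
                  · exact hh
                · exact Or.inr)
              hpw' hmem'
      | none =>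
        have hns : pos ∉ sp.map (fun l => l.1) := by
          intro hm
          rcases List.mem_map.1 hm with ⟨l, hl, he⟩
          obtain ⟨l1, l2⟩ := l
          simp only at he
          subst he
          have hcontra : d.get? l1 = some l2 := (hinv l1 l2 le_rfl).2 hl
          rw [hget] at hcontra
          simp at hcontra
        have hc := PySem.List.pyGet?_eq_some_getElem t h0 hlt
        simp only [pyALoop, if_pos hlt, hget, hc]
        have hg : t[pos.toNat] = t[pos.toNat]! :=
          (getElem!_pos t pos.toNat (by omega)).symm
        rw [hg, ih sp (pos + 1) (acc ++ [t[pos.toNat]!])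
          (fun s v hs => hinv s v (by omega)) hpw (by omega) (by omega)]
        rw [Rspec_shift t sp pos h0 hlt hns, List.append_assoc]
        rfl
    · simp only [pyALoop, if_neg hlt]
      rw [Rspec_done t sp pos h0 (by omega), List.append_nil]

-- B's render pass flattens to the Rspec of the chosen spans
theorem renderGo_eq (t : List Char) :
    ∀ (ch : List (Int × Int × String)) (parts : List (List Char)) (cur : Int),
      ((renderGo t ch parts cur).1 ++
        [PySem.List.slice t (some (renderGo t ch parts cur).2) none]).flatten =
      parts.flatten ++ Rspec t ch cur := by
  intro ch
  induction ch with
  | nil => intro parts cur; simp [renderGo, Rspec]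
  | cons a r ih =>
    intro parts cur
    simp only [renderGo, Rspec]
    rw [ih]
    simp

-- ===== VERDICT (by name: the statement is the Claim_ definition above) =====
theorem print_text_with_labels_spec : Claim_equal_print_text_with_labels := by
  intro text labels_set _ hPre
  unfold Spec_print_text_with_labels
  simp only [print_text_with_labels, print_text_with_labels_alt]
  set t := text.toList with ht
  set d := labels_set.foldl (fun d l => d.insert l.1 l.2)
            (PySem.Dict.empty : PySem.Dict Int (Int × String)) with hd
  have hdget : ∀ k, d.get? k = firstGet labels_set.reverse k := by
    intro k
    rw [hd, get?_foldl_firstGet]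
    simp [PySem.Dict.empty, PySem.Dict.get?]
  set spans := dedupGo labels_set.reverse PySem.Set.empty with hspans
  set sp := PySem.List.sorted spans (fun l => l.1) false with hsp
  have hmemiff : ∀ (s : Int) (v : Int × String), d.get? s = some v ↔ (s, v.1, v.2) ∈ sp := by
    intro s v
    rw [hdget, hsp, PySem.List.mem_sorted, hspans, mem_dedupGo]
    simp [PySem.Set.empty]
  have hPre' : ∀ (k : Int) (v : Int × String), d.get? k = some v → 0 ≤ k → k < (t.length : Int) → k < v.1 := by
    intro k v hget h0 hlen
    have hmem : (k, v.1, v.2) ∈ labels_set := by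
      have := firstGet_mem _ _ _ ((hdget k) ▸ hget)
      exact List.mem_reverse.1 this
    exact hPre _ hmem h0 hlen
  have hpw : sp.Pairwise (fun a b => a.1 < b.1) := by
    have hle : sp.Pairwise (fun a b => a.1 ≤ b.1) :=
      PySem.List.sorted_pairwise spans (fun l => l.1)
    have hne : sp.Pairwise (fun a b => a.1 ≠ b.1) := by
      refine ((PySem.List.sorted_perm spans (fun l => l.1) false).pairwise_iff ?_).2
        (dedupGo_pairwise _ _)
      intro a b h
      exact fun he => h he.symm
    exact (hle.and hne).imp (fun h => lt_of_le_of_ne h.1 h.2)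
  have hmain := main_loop t d hPre' (t.length + 1) sp 0 []
    (fun s v _ => hmemiff s v) hpw le_rfl (by push_cast; omega)
  rw [hmain, List.nil_append, renderGo_eq t (selectGo (t.length : Int) sp 0) [] 0]
  simp
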